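-- pv_equiv track=rewrite | github.com/wldnjsrla1324/Algorithm | 프로그래머스/2/76502. 괄호 회전하기/괄호 회전하기.py | solution
-- ===== SOURCE A (Python) =====
-- def bracket(s):
--     stack=[0]
--     for i in range(len(s)):
--         if s[i] =='(' or s[i] =='{' or s[i] =='[':
--             stack.append(s[i])
--         elif s[i] == ')' and stack[-1] == '(':
--             stack = stack[:-1]
--         elif s[i] == '}' and stack[-1] == '{':
--             stack = stack[:-1]
--         elif s[i] == ']' and stack[-1] == '[':
--             stack = stack[:-1]
--         else:
--             return False
--
--     if stack==[0]:
--         return True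
--     else:
--         return False
--
-- def solution(s):
--     answer = 0
--     for x in range(len(s)):
--         if bracket(s)==True:
--             answer+=1
--         left = s[0]
--         s=s[1:]+left
--     return answer
-- ===== SOURCE B (Python) =====
-- PAIRS = ("()", "{}", "[]")
--
--
-- def _reduce_once(u):
--     """Return u with its first adjacent matching pair removed, or None if there is none."""
--     for i in range(len(u) - 1):
--         if u[i] + u[i + 1] in PAIRS:
--             return u[:i] + u[i + 2:]
--     return None
--
--
-- def _valid(u):
--     while True:
--         r = _reduce_once(u)
--         if r is None:
--             return u == ""
--         u = r
--
--
-- def solution(s):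
--     n = len(s)
--     return sum(1 for i in range(n) if _valid(s[i:] + s[:i]))
-- ===== Notes on version B (the rewrite author's own statement) =====
-- stated objective: alternative
-- what changed: B decides each rotation by repeatedly cancelling the first adjacent matching bracket pair until a fixpoint is reached (balanced iff the fixpoint is empty), instead of A's push/pop stack machine, and builds each rotation directly as s[i:]+s[:i].
import Mathlib
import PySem

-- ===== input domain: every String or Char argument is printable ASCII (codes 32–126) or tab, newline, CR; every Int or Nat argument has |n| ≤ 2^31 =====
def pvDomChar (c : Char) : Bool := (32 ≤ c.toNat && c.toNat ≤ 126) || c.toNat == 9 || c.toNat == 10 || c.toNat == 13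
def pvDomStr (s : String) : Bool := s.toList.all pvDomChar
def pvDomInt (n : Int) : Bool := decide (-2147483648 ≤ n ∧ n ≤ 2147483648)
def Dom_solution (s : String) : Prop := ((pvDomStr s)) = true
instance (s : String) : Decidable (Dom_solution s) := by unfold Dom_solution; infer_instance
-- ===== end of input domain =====

-- B replaces A's stack machine by repeated cancellation of the first adjacent matching
-- bracket pair to a fixpoint (balanced iff the fixpoint is empty) and builds each
-- rotation directly as s[i:]+s[:i] (alternative algorithm, same asymptotic cost).

-- ===== PORT A =====
-- A's `bracket` loop: the Python stack is the heterogeneous list [0, c1, c2, …];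
-- we model it as List (Option Char) with `none` for the sentinel 0.
def bracketA_go : List Char → List (Option Char) → Bool
  | [], stack => stack == [none]
  | c :: rest, stack =>
    if c == '(' || c == '{' || c == '[' then bracketA_go rest (stack ++ [some c])
    else if c == ')' && stack.getLast? == some (some '(') then bracketA_go rest stack.dropLast
    else if c == '}' && stack.getLast? == some (some '{') then bracketA_go rest stack.dropLast
    else if c == ']' && stack.getLast? == some (some '[') then bracketA_go rest stack.dropLast
    else false

def bracketA (u : List Char) : Bool := bracketA_go u [none]

-- A's `solution` loop: fuel = len(s); each step tests the current string then rotates it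
-- (s = s[1:] + s[0]).  The [] case is unreachable since fuel equals the length.
def solution_loop : Nat → List Char → Int → Int
  | 0, _, acc => acc
  | Nat.succ k, u, acc =>
    let acc' := if bracketA u then acc + 1 else acc
    match u with
    | [] => solution_loop k [] acc'
    | h :: t => solution_loop k (t ++ [h]) acc'

def solution (s : String) : Int := solution_loop s.toList.length s.toList 0

-- ===== PORT B =====
-- Source B `_reduce_once`: remove the first adjacent matching pair, none if no pair exists.
def isPairB (a b : Char) : Bool :=
  (a == '(' && b == ')') || (a == '{' && b == '}') || (a == '[' && b == ']')

def reduceOnce : List Char → Option (List Char)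
  | a :: b :: rest =>
    if isPairB a b then some rest
    else
      match reduceOnce (b :: rest) with
      | some v => some (a :: v)
      | none => none
  | _ => none

theorem reduceOnce_length : ∀ {u v : List Char}, reduceOnce u = some v → v.length < u.length := by
  intro u
  induction u with
  | nil => intro v h; simp [reduceOnce] at h
  | cons a t ih =>
    intro v h
    cases t with
    | nil => simp [reduceOnce] at h
    | cons b rest =>
      simp only [reduceOnce] at h
      split at h
      · cases h; simp
      · cases hr : reduceOnce (b :: rest) with
        | none => rw [hr] at h; simp at h
        | some w =>
          rw [hr] at h
          simp at h
          have := ih hr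
          subst h
          simpa using Nat.succ_lt_succ this

-- Source B `_valid`: cancel pairs to a fixpoint; balanced iff the fixpoint is empty.
def validB (u : List Char) : Bool :=
  match h : reduceOnce u with
  | some v => validB v
  | none => u == []
termination_by u.length
decreasing_by exact reduceOnce_length h

-- Source B `solution`: count rotations s[i:]+s[:i] that are valid.
def solution_alt (s : String) : Int :=
  let u := s.toList
  (List.range u.length).foldl
    (fun acc i => if validB (u.drop i ++ u.take i) then acc + 1 else acc) 0

-- ===== PRECONDITION & SPEC =====
def Spec_solution (s : String) (out : Int) : Prop := out = solution_alt s
instance (s : String) (out : Int) : Decidable (Spec_solution s out) := by unfold Spec_solution; infer_instance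

-- ===== CLAIM (what is proved, stated in full; the proofs are below) =====
def Claim_equal_solution : Prop := ∀ (s : String), Dom_solution s → Spec_solution s (solution s)

-- ===== LEMMAS AND PROOFS =====

-- A clean stack acceptor used as a bridge between the two ports.
def isOpenC (c : Char) : Bool := c == '(' || c == '{' || c == '['

def pairOf (c : Char) : Option Char :=
  if c == ')' then some '(' else if c == '}' then some '{' else if c == ']' then some '[' else none

def chkStep (c : Char) (st : List Char) : Option (List Char) :=
  if isOpenC c then some (c :: st)
  else
    match pairOf c with
    | some p =>
      match st with
      | q :: st' => if q == p then some st' else none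
      | [] => none
    | none => none

def chk_go : List Char → List Char → Bool
  | [], st => st.isEmpty
  | c :: cs, st =>
    match chkStep c st with
    | some st' => chk_go cs st'
    | none => false

-- A's checker equals the clean acceptor: A's stack is [sentinel] ++ (chk's stack, reversed, boxed).
theorem go_eq (cs : List Char) : ∀ stackB : List Char,
    bracketA_go cs (none :: (stackB.map some).reverse) = chk_go cs stackB := by
  induction cs with
  | nil =>
    intro stackB
    cases stackB with
    | nil => simp [bracketA_go, chk_go]
    | cons q rest => simp [bracketA_go, chk_go]
  | cons c rest ih =>
    intro stackB
    by_cases hop : c = '(' ∨ c = '{' ∨ c = '['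
    · rcases hop with h | h | h <;> subst h <;>
        simp only [bracketA_go, chk_go, chkStep, isOpenC] <;> simp <;>
        simpa using ih (_ :: stackB)
    · cases stackB with
      | nil =>
        simp only [bracketA_go, chk_go, chkStep, isOpenC, List.map_nil, List.reverse_nil]
        have h1 : ¬ (c == '(' || c == '{' || c == '[') = true := by
          simp only [Bool.or_eq_true, beq_iff_eq]; tauto
        simp only [h1, Bool.false_eq_true]
        simp [pairOf, List.getLast?]
        split_ifs <;> simp_all
      | cons q rest' =>
        have h1 : ¬ (c == '(' || c == '{' || c == '[') = true := by
          simp only [Bool.or_eq_true, beq_iff_eq]; tauto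
        have hlast : (none :: ((rest'.map some).reverse ++ [some q])).getLast? = some (some q) := by
          rw [← List.cons_append, List.getLast?_concat]
        have hdrop : (none :: ((rest'.map some).reverse ++ [some q])).dropLast
            = none :: (rest'.map some).reverse := by
          rw [← List.cons_append, List.dropLast_concat]
        simp only [bracketA_go, chk_go, chkStep, isOpenC, List.map_cons, List.reverse_cons, h1,
          Bool.false_eq_true, hlast, hdrop]
        simp only [pairOf]
        by_cases hc1 : c = ')'
        · subst hc1
          by_cases hq : q = '(' <;> simp [hq, ih rest']
        · by_cases hc2 : c = '}'
          · subst hc2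
            by_cases hq : q = '{' <;> simp [hq, ih rest']
          · by_cases hc3 : c = ']'
            · subst hc3
              by_cases hq : q = '[' <;> simp [hq, ih rest']
            · simp [hc1, hc2, hc3]

theorem bracketA_eq_chk (u : List Char) : bracketA u = chk_go u [] := by
  simpa using go_eq u []

-- cancelling an adjacent matching pair does not change acceptance
theorem reduceOnce_chk : ∀ (u v : List Char), reduceOnce u = some v →
    ∀ st, chk_go u st = chk_go v st := by
  intro u
  induction u with
  | nil => intro v h; simp [reduceOnce] at h
  | cons a t ih =>
    intro v h st
    cases t with
    | nil => simp [reduceOnce] at h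
    | cons b rest =>
      simp only [reduceOnce] at h
      split at h
      · rename_i hp
        cases h
        -- a,b is a matching pair: a pushes then b pops
        simp only [isPairB, Bool.or_eq_true, Bool.and_eq_true, beq_iff_eq] at hp
        rcases hp with (⟨ha, hb⟩ | ⟨ha, hb⟩) | ⟨ha, hb⟩ <;> subst ha <;> subst hb <;>
          simp [chk_go, chkStep, isOpenC, pairOf]
      · cases hr : reduceOnce (b :: rest) with
        | none => rw [hr] at h; simp at h
        | some w =>
          rw [hr] at h
          simp at h
          subst h
          simp only [chk_go]
          cases hs : chkStep a st with
          | none => rfl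
          | some st' => exact ih w hr st'

-- a matching pair anywhere means reduceOnce finds something
theorem reduceOnce_ne_none (a b : Char) (hp : isPairB a b = true) :
    ∀ (xs ys : List Char), reduceOnce (xs ++ a :: b :: ys) ≠ none := by
  intro xs
  induction xs with
  | nil => intro ys; simp [reduceOnce, hp]
  | cons x t ih =>
    intro ys
    cases t with
    | nil =>
      simp only [List.nil_append, List.cons_append, reduceOnce]
      split
      · simp
      · cases hr : reduceOnce (a :: b :: ys) with
        | none => exact absurd hr (ih ys)
        | some v => simp
    | cons y t' =>
      simp only [List.cons_append, reduceOnce]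
      split
      · simp
      · cases hr : reduceOnce (y :: (t' ++ a :: b :: ys)) with
        | none => exact absurd hr (by simpa using ih ys)
        | some v => simp

-- the stack acceptor runs over an all-opener prefix by pushing it
theorem chk_go_openers : ∀ (os rest st : List Char), (∀ c ∈ os, isOpenC c = true) →
    chk_go (os ++ rest) st = chk_go rest (os.reverse ++ st) := by
  intro os
  induction os with
  | nil => intro rest st _; simp
  | cons o t ih =>
    intro rest st h
    have ho : isOpenC o = true := h o (by simp)
    simp only [List.cons_append, chk_go, chkStep, ho, if_pos]
    rw [ih rest (o :: st) (fun c hc => h c (by simp [hc]))]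
    simp

-- pairOf inverts isPairB
theorem pairOf_isPair (c p : Char) (h : pairOf c = some p) : isPairB p c = true := by
  simp only [pairOf] at h
  split_ifs at h with h1 h2 h3
  · rw [beq_iff_eq] at h1; subst h1; injection h with h'; subst h'; decide
  · rw [beq_iff_eq] at h2; subst h2; injection h with h'; subst h'; decide
  · rw [beq_iff_eq] at h3; subst h3; injection h with h'; subst h'; decide

-- hard direction: an accepted string with no adjacent matching pair is empty
theorem chk_of_irreducible (u : List Char) (hnr : reduceOnce u = none) (hne : u ≠ []) :
    chk_go u [] = false := by
  have hsplit : u = u.takeWhile isOpenC ++ u.dropWhile isOpenC := (List.takeWhile_append_dropWhile).symm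
  set os := u.takeWhile isOpenC with hos
  set rest := u.dropWhile isOpenC with hrest
  have hall : ∀ c ∈ os, isOpenC c = true := fun c hc => List.mem_takeWhile_imp hc
  rw [hsplit, chk_go_openers os rest [] hall]
  cases hr : rest with
  | nil =>
    have hos_ne : os ≠ [] := by
      intro h0
      apply hne
      rw [hsplit, h0, hr]
      rfl
    simp only [chk_go, List.append_nil]
    cases hrev : os.reverse with
    | nil => exact absurd (List.reverse_eq_nil_iff.mp hrev) hos_ne
    | cons q t => rfl
  | cons c rest' =>
    have hcnotopen : isOpenC c = false := by
      have := List.head?_dropWhile_not isOpenC u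
      rw [← hrest, hr] at this
      simpa using this
    simp only [chk_go, chkStep, hcnotopen, Bool.false_eq_true]
    cases hpc : pairOf c with
    | none => rfl
    | some p =>
      cases hrev : os.reverse with
      | nil => simp
      | cons q t =>
        simp only [List.append_nil]
        by_cases hq : q = p
        · -- matching pair (q, c) adjacent in u: contradiction with reduceOnce u = none
          exfalso
          subst hq
          have hos' : os = t.reverse ++ [q] := by
            have := congrArg List.reverse hrev
            simpa using this
          have hu : u = t.reverse ++ q :: c :: rest' := by
            rw [hsplit, hos', hr]; simp
          have hpair : isPairB q c = true := pairOf_isPair c q hpc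
          exact reduceOnce_ne_none q c hpair t.reverse rest' (by rw [← hu]; exact hnr)
        · simp [hq]

-- the cancellation fixpoint test equals the stack acceptor
theorem validB_eq_chk (u : List Char) : validB u = chk_go u [] := by
  induction u using validB.induct with
  | case1 u v h ih =>
    have hstep : validB u = validB v := by rw [validB]; split <;> simp_all
    rw [hstep, ih, reduceOnce_chk u v h []]
  | case2 u h =>
    have hstep : validB u = (u == []) := by rw [validB]; split <;> simp_all
    rw [hstep]
    cases hu : u with
    | nil => simp [chk_go]
    | cons a t =>
      rw [← hu]
      have hne : u ≠ [] := by simp [hu]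
      rw [chk_of_irreducible u h hne]
      simp [hu]

-- the accumulator of the counting foldl is additive
theorem foldl_count_add (p : Nat → Bool) (l : List Nat) : ∀ x y : Int,
    l.foldl (fun a i => if p i then a + 1 else a) (x + y)
      = x + l.foldl (fun a i => if p i then a + 1 else a) y := by
  induction l with
  | nil => intro x y; simp
  | cons i l ih =>
    intro x y
    simp only [List.foldl_cons]
    by_cases h : p i = true
    · simp only [h, if_pos]
      have hxy : x + y + 1 = x + (y + 1) := by ring
      rw [hxy, ih]
    · simp only [h, Bool.false_eq_true, if_false]
      exact ih x y

-- A's loop counts bracketA over successive rotations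
theorem loop_eq (k : Nat) : ∀ (u : List Char) (acc : Int),
    solution_loop k u acc
      = acc + (List.range k).foldl (fun a i => if bracketA (u.rotate i) then a + 1 else a) 0 := by
  induction k with
  | zero => intro u acc; simp [solution_loop]
  | succ k ih =>
    intro u acc
    have step : solution_loop (k + 1) u acc
        = solution_loop k (u.rotate 1) (if bracketA u then acc + 1 else acc) := by
      cases u with
      | nil => simp [solution_loop, List.rotate_nil]
      | cons h t => simp [solution_loop, List.rotate_cons_succ]
    rw [step, ih]
    rw [List.range_succ_eq_map]
    simp only [List.foldl_cons, List.foldl_map, List.rotate_rotate, List.rotate_zero,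
      Nat.succ_eq_add_one]
    have hfold : ∀ z : Int,
        (List.range k).foldl (fun a i => if bracketA (u.rotate (1 + i)) then a + 1 else a) z
          = (List.range k).foldl (fun a i => if bracketA (u.rotate (i + 1)) then a + 1 else a) z := by
      intro z
      apply List.foldl_ext
      intro a b _
      rw [Nat.add_comm]
    by_cases h : bracketA u = true
    · simp only [h, if_pos, hfold]
      have hadd := foldl_count_add (fun i => bracketA (u.rotate (i + 1))) (List.range k) 1 0
      simp only [zero_add] at hadd ⊢
      have h10 : (1 : Int) + 0 = 1 := by norm_num
      rw [h10] at hadd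
      rw [hadd]
      ring
    · simp only [h, Bool.false_eq_true, if_false, hfold]

-- ===== VERDICT (by name: the statement is the Claim_ definition above) =====
theorem solution_spec : Claim_equal_solution := by
  intro s _
  unfold Spec_solution solution solution_alt
  rw [loop_eq]
  simp only [zero_add]
  apply List.foldl_ext
  intro a i hi
  rw [List.mem_range] at hi
  rw [bracketA_eq_chk, ← validB_eq_chk,
    List.rotate_eq_drop_append_take (Nat.le_of_lt hi)]
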